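-- pv_equiv track=rewrite | github.com/whu-lyh/SCSegamba | mmcls/SAVSS_dev/models/SAVSS/HSMM_layer.py | Parallel_snake_vertical
-- ===== SOURCE A (Python) =====
-- def Parallel_snake_vertical(hw_shape):
--     """
--     Generate a vertical snake-like traversal order for an H×W grid.
--
--     This function constructs a vertical “snake” (zig-zag) scanning order over
--     a 2D grid. The traversal proceeds column by column: in even-indexed
--     columns it scans from top to bottom, and in odd-indexed columns it scans
--     bottom to top. This produces a continuous 1D index sequence. The function
--     also returns the inverse mapping from each grid index to its position
--     in the snake traversal.
--
--     Args:
--         hw_shape (tuple):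
--             A tuple (H, W) specifying the grid height and width.
--
--     Returns:
--         tuple:
--             o1 (list[int]):
--                 A list of length H*W containing the linear indices of all
--                 grid cells visited in vertical snake order.
--             o1_inverse (list[int]):
--                 A list of length H*W that maps each grid index to its order
--                 in the snake traversal. For any index k, `o1_inverse[k]`
--                 gives its position within `o1`.
--     """
--     H, W = hw_shape
--     L = H * W
--     o1 = []
--     d1 = []
--     o1_inverse = [-1 for _ in range(L)]
--
--     i, j = 0, 0
--     i_d = "down"
--     while j < W:
--         assert i_d in ["down", "up"]
--         idx = i * W + j
--         o1_inverse[idx] = len(o1)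
--         o1.append(idx)
--         if i_d == "down":
--             if i < H - 1:
--                 i = i + 1
--                 d1.append(4)
--             else:
--                 j = j + 1
--                 d1.append(1)
--                 i_d = "up"
--         else:
--             if i > 0:
--                 i = i - 1
--                 d1.append(3)
--             else:
--                 j = j + 1
--                 d1.append(1)
--                 i_d = "down"
--     d1 = [0] + d1[:-1]
--
--     return o1, o1_inverse
-- ===== SOURCE B (Python) =====
-- def Parallel_snake_vertical(hw_shape):
--     H, W = hw_shape
--     o1 = []
--     if H > 0:  # no rows -> empty traversal
--         for j in range(W):
--             rows = range(H) if j % 2 == 0 else reversed(range(H))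
--             for i in rows:
--                 o1.append(i * W + j)
--     o1_inverse = [-1] * (H * W)
--     for pos, idx in enumerate(o1):
--         o1_inverse[idx] = pos
--     return o1, o1_inverse
-- ===== Notes on version B (the rewrite author's own statement) =====
-- stated objective: simpler
-- what changed: Replaces the one-cell direction state machine (and its unused d1 list) with explicit per-column passes: even columns top-to-bottom, odd columns bottom-to-top, then a single enumerate pass building the inverse.
-- outside the precondition, e.g. on Parallel_snake_vertical((0, 3)): A raises IndexError, B returns ([], [])
-- crash fix: On inputs with W > 0 and H <= 0 A raises IndexError (it indexes the empty inverse list before checking bounds); B returns ([], []). — e.g. on Parallel_snake_vertical(0, 3): A raises IndexError, B returns ([], [])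
import Mathlib
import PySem

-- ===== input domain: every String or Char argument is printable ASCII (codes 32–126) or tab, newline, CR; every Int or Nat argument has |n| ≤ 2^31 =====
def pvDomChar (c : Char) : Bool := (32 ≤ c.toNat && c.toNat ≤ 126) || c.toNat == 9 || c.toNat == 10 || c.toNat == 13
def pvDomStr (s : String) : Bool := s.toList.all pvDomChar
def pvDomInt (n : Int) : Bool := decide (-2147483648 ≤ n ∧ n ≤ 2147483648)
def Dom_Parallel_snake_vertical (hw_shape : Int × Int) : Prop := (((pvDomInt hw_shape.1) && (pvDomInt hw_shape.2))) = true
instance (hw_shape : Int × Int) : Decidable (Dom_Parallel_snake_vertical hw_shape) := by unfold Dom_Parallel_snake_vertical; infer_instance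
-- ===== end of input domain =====

-- B replaces A's one-cell direction state machine (and its unused d1 list) by explicit
-- per-column passes (even columns top-to-bottom, odd columns bottom-to-top) plus one
-- enumerate pass for the inverse. Equivalence is proved on Pre_ (A raises IndexError
-- when W > 0 and H ≤ 0; B returns ([], []) there — see Raises_ block).

-- ===== PORT A =====
-- A's while loop, step for step. Fuel = (H*W).toNat: inside Pre_ the loop performs
-- exactly H*W iterations (proved below), so the fuel-0 return never truncates the loop.
-- `inv.set idx.toNat …` ports `o1_inverse[idx] = len(o1)`: exact since 0 ≤ idx < len
-- on every iteration reachable inside Pre_ (Python would wrap a negative idx).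
def pvLoopA (H W : Int) : Nat → Int → Int → Bool → List Int → List Int → List Int →
    List Int × List Int × List Int
  | 0, _, _, _, o1, inv, d1 => (o1, inv, d1)
  | fuel+1, i, j, down, o1, inv, d1 =>
    if j < W then
      let idx := i * W + j
      let inv' := inv.set idx.toNat (o1.length : Int)
      let o1' := o1 ++ [idx]
      if down then
        if i < H - 1 then pvLoopA H W fuel (i+1) j down o1' inv' (d1 ++ [4])
        else pvLoopA H W fuel i (j+1) false o1' inv' (d1 ++ [1])
      else
        if i > 0 then pvLoopA H W fuel (i-1) j false o1' inv' (d1 ++ [3])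
        else pvLoopA H W fuel i (j+1) true o1' inv' (d1 ++ [1])
    else (o1, inv, d1)

def Parallel_snake_vertical (hw_shape : Int × Int) : List Int × List Int :=
  let H := hw_shape.1
  let W := hw_shape.2
  let L := H * W
  let o1_inverse := List.replicate L.toNat (-1 : Int)   -- [-1 for _ in range(L)]
  let r := pvLoopA H W (H * W).toNat 0 0 true [] o1_inverse []
  let _d1 := ([0] : List Int) ++ r.2.2.dropLast         -- d1 = [0] + d1[:-1]  (unused by the return)
  (r.1, r.2.1)

-- ===== PORT B =====
-- `o1_inverse[idx] = pos` ported as .set idx.toNat pos: exact, every idx in o1 lies in [0, H*W).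
def Parallel_snake_vertical_alt (hw_shape : Int × Int) : List Int × List Int :=
  let H := hw_shape.1
  let W := hw_shape.2
  let o1 := if 0 < H then
      (PySem.List.pyRange 0 W 1).foldl (fun acc j =>
        let rows := if PySem.Int.mod j 2 = 0 then PySem.List.pyRange 0 H 1
                    else (PySem.List.pyRange 0 H 1).reverse
        rows.foldl (fun acc2 i => acc2 ++ [i * W + j]) acc) []
    else []
  let o1_inverse := (PySem.List.enumerate o1 0).foldl
      (fun acc p => acc.set p.2.toNat p.1) (List.replicate (H * W).toNat (-1 : Int))
  (o1, o1_inverse)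

-- ===== PRECONDITION & SPEC =====
-- Pre_ excludes exactly the inputs where A raises IndexError (W > 0 with H ≤ 0:
-- it indexes the empty inverse list before the H-1 check).
def Pre_Parallel_snake_vertical (hw_shape : Int × Int) : Prop :=
  0 < hw_shape.1 ∨ hw_shape.2 ≤ 0
instance (hw_shape : Int × Int) : Decidable (Pre_Parallel_snake_vertical hw_shape) := by
  unfold Pre_Parallel_snake_vertical; infer_instance

def pvWitness_Parallel_snake_vertical : (Int × Int) := (2, 3)

-- On inputs with W > 0 and H ≤ 0 A raises IndexError; B returns ([], []).
def Raises_Parallel_snake_vertical (hw_shape : Int × Int) : Prop :=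
  0 < hw_shape.2 ∧ hw_shape.1 ≤ 0
instance (hw_shape : Int × Int) : Decidable (Raises_Parallel_snake_vertical hw_shape) := by
  unfold Raises_Parallel_snake_vertical; infer_instance
def pvRaiseWitness_Parallel_snake_vertical : (Int × Int) := (0, 3)
def pvRaiseWitnessOut_Parallel_snake_vertical : List Int × List Int := ([], [])

def Spec_Parallel_snake_vertical (hw_shape : Int × Int) (out : List Int × List Int) : Prop :=
  out = Parallel_snake_vertical_alt hw_shape
instance (hw_shape : Int × Int) (out : List Int × List Int) :
    Decidable (Spec_Parallel_snake_vertical hw_shape out) := by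
  unfold Spec_Parallel_snake_vertical; infer_instance

-- ===== CLAIM (what is proved, stated in full; the proofs are below) =====
def Claim_equal_Parallel_snake_vertical : Prop :=
  ∀ (hw_shape : Int × Int), Dom_Parallel_snake_vertical hw_shape →
    Pre_Parallel_snake_vertical hw_shape →
    Spec_Parallel_snake_vertical hw_shape (Parallel_snake_vertical hw_shape)

def Claim_raises_Parallel_snake_vertical : Prop :=
  (∀ (hw_shape : Int × Int), Dom_Parallel_snake_vertical hw_shape →
      Raises_Parallel_snake_vertical hw_shape → ¬ Pre_Parallel_snake_vertical hw_shape) ∧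
  (Dom_Parallel_snake_vertical (pvRaiseWitness_Parallel_snake_vertical) ∧
   Raises_Parallel_snake_vertical (pvRaiseWitness_Parallel_snake_vertical) ∧
   Parallel_snake_vertical_alt (pvRaiseWitness_Parallel_snake_vertical) =
     pvRaiseWitnessOut_Parallel_snake_vertical)

-- ===== LEMMAS AND PROOFS =====

def pvStream (H W : Int) : Nat → Int → Int → Bool → List Int
  | 0, _, _, _ => []
  | fuel+1, i, j, down =>
    if j < W then
      (i * W + j) ::
        (if down then
           if i < H - 1 then pvStream H W fuel (i+1) j down
           else pvStream H W fuel i (j+1) false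
         else
           if i > 0 then pvStream H W fuel (i-1) j false
           else pvStream H W fuel i (j+1) true)
    else []

def pvApply : List Int → Int → List Int → List Int
  | inv, _, [] => inv
  | inv, p, x :: S => pvApply (inv.set x.toNat p) (p+1) S

def pvColB (H W j : Int) : List Int :=
  (if PySem.Int.mod j 2 = 0 then PySem.List.pyRange 0 H 1
   else (PySem.List.pyRange 0 H 1).reverse).map (fun i => i * W + j)

theorem pvLoopA_sim (H W : Int) : ∀ (fuel : Nat) (i j : Int) (down : Bool)
    (o1 inv d1 : List Int),
    (pvLoopA H W fuel i j down o1 inv d1).1 = o1 ++ pvStream H W fuel i j down ∧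
    (pvLoopA H W fuel i j down o1 inv d1).2.1 =
      pvApply inv (o1.length : Int) (pvStream H W fuel i j down) := by
  intro fuel
  induction fuel with
  | zero => intro i j down o1 inv d1; simp [pvLoopA, pvStream, pvApply]
  | succ fuel ih =>
    intro i j down o1 inv d1
    by_cases hj : j < W
    · simp only [pvLoopA, pvStream, hj, if_pos]
      split_ifs with hd hi hi <;>
      · constructor
        · rw [(ih _ _ _ _ _ _).1]; simp
        · rw [(ih _ _ _ _ _ _).2]; simp [pvApply]
    · simp [pvLoopA, pvStream, hj, pvApply]

theorem pvStream_down (H W : Int) : ∀ (n fuel : Nat) (j : Int), j < W → (n : Int) ≤ H - 1 →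
    pvStream H W (fuel + (n+1)) (H - 1 - n) j true =
      ((PySem.List.pyRange (H - 1 - n) H 1).map (fun i => i * W + j)) ++
        pvStream H W fuel (H - 1) (j+1) false := by
  intro n
  induction n with
  | zero =>
    intro fuel j hj hn
    rw [PySem.List.pyRange_one_cons (by omega), PySem.List.pyRange_one_eq_nil (by omega)]
    simp [pvStream, hj]
  | succ n ih =>
    intro fuel j hj hn
    have hi : H - 1 - (n+1 : Nat) < H - 1 := by push_cast; omega
    rw [PySem.List.pyRange_one_cons (by push_cast; omega)]
    show pvStream H W (fuel + (n+1) + 1) _ j true = _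
    rw [pvStream]
    simp only [hj, if_pos, hi]
    have : H - 1 - ((n:Int)+1) + 1 = H - 1 - n := by ring
    push_cast
    rw [this, ih fuel j hj (by omega)]
    simp

theorem pvStream_up (H W : Int) : ∀ (n fuel : Nat) (j : Int), j < W → (n : Int) ≤ H - 1 →
    pvStream H W (fuel + (n+1)) (n : Int) j false =
      ((PySem.List.pyRange 0 ((n : Int) + 1) 1).reverse.map (fun i => i * W + j)) ++
        pvStream H W fuel 0 (j+1) true := by
  intro n
  induction n with
  | zero =>
    intro fuel j hj hn
    rw [PySem.List.pyRange_one_cons (by omega), PySem.List.pyRange_one_eq_nil (by omega)]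
    simp [pvStream, hj]
  | succ n ih =>
    intro fuel j hj hn
    push_cast
    rw [show (n:Int) + 1 + 1 = ((n:Int)+1) + 1 from rfl,
        PySem.List.pyRange_one_succ_right (by omega)]
    show pvStream H W (fuel + (n+1) + 1) _ j false = _
    rw [pvStream]
    have hpos : ((n:Int)+1) > 0 := by omega
    simp only [hj, if_pos, if_false, Bool.false_eq_true, hpos]
    rw [show (n:Int) + 1 - 1 = (n:Int) by ring, ih fuel j hj (by omega)]
    simp

theorem pvStream_col_down (H W : Int) (h : Nat) (hH : H = (h : Int)) (hh : 0 < h)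
    (fuel : Nat) (j : Int) (hj : j < W) :
    pvStream H W (fuel + h) 0 j true =
      ((PySem.List.pyRange 0 H 1).map (fun i => i * W + j)) ++
        pvStream H W fuel (H - 1) (j+1) false := by
  have e1 : fuel + h = fuel + ((h-1) + 1) := by omega
  have e2 : H - 1 - ((h-1 : Nat) : Int) = 0 := by
    subst hH; push_cast [Nat.cast_sub hh]; ring
  rw [e1, ← e2, pvStream_down H W (h-1) fuel j hj (by omega)]

theorem pvStream_col_up (H W : Int) (h : Nat) (hH : H = (h : Int)) (hh : 0 < h)
    (fuel : Nat) (j : Int) (hj : j < W) :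
    pvStream H W (fuel + h) (H - 1) j false =
      ((PySem.List.pyRange 0 H 1).reverse.map (fun i => i * W + j)) ++
        pvStream H W fuel 0 (j+1) true := by
  have e1 : fuel + h = fuel + ((h-1) + 1) := by omega
  have e2 : ((h-1 : Nat) : Int) = H - 1 := by
    subst hH; push_cast [Nat.cast_sub hh]; ring
  have e3 : ((h-1 : Nat) : Int) + 1 = H := by omega
  rw [e1, ← e2, pvStream_up H W (h-1) fuel j hj (by omega), e3]

theorem pvStream_main (H W : Int) (h : Nat) (hH : H = (h : Int)) (hh : 0 < h) :
    ∀ (m : Nat) (j : Int) (d : Bool), 0 ≤ j → j + (m : Int) = W →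
      (d = true ↔ j % 2 = 0) →
      pvStream H W (m * h) (if d then 0 else H - 1) j d =
        (PySem.List.pyRange j W 1).flatMap (pvColB H W) := by
  intro m
  induction m with
  | zero =>
    intro j d hj hjm hd
    rw [PySem.List.pyRange_one_eq_nil (by omega)]
    simp [pvStream]
  | succ m ih =>
    intro j d hj hjm hd
    have hjW : j < W := by push_cast at hjm; omega
    have hmod : PySem.Int.mod j 2 = j % 2 := PySem.Int.mod_eq_emod_of_pos (by omega)
    rw [PySem.List.pyRange_one_cons hjW, List.flatMap_cons,
        show (m+1) * h = m * h + h from by ring]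
    cases d with
    | true =>
      have hje : j % 2 = 0 := hd.mp rfl
      simp only [if_true]
      rw [pvStream_col_down H W h hH hh (m*h) j hjW]
      have := ih (j+1) false (by omega) (by push_cast at hjm ⊢; omega)
        (by simp only [Bool.false_eq_true, false_iff]; omega)
      rw [if_neg (by simp)] at this
      rw [this]
      unfold pvColB
      rw [hmod, if_pos hje]
    | false =>
      have hje : ¬ (j % 2 = 0) := by
        intro hc; exact absurd (hd.mpr hc) (by simp)
      simp only [Bool.false_eq_true, if_false]
      rw [pvStream_col_up H W h hH hh (m*h) j hjW]
      have := ih (j+1) true (by omega) (by push_cast at hjm ⊢; omega)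
        (by simp only [true_iff]; omega)
      rw [if_pos rfl] at this
      rw [this]
      unfold pvColB
      rw [hmod, if_neg hje]

theorem pvApply_enum : ∀ (S inv : List Int) (p : Int),
    (PySem.List.enumerate S p).foldl (fun acc q => acc.set q.2.toNat q.1) inv =
      pvApply inv p S := by
  intro S
  induction S with
  | nil => intro inv p; simp [PySem.List.enumerate_nil, pvApply]
  | cons x S ih => intro inv p; rw [PySem.List.enumerate_cons]; simp [pvApply, ih]

theorem pvB_o1 (H W : Int) :
    (PySem.List.pyRange 0 W 1).foldl (fun acc j =>
      (if PySem.Int.mod j 2 = 0 then PySem.List.pyRange 0 H 1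
       else (PySem.List.pyRange 0 H 1).reverse).foldl (fun acc2 i => acc2 ++ [i * W + j]) acc)
      [] = (PySem.List.pyRange 0 W 1).flatMap (pvColB H W) := by
  have inner : ∀ (j : Int) (acc : List Int),
      (if PySem.Int.mod j 2 = 0 then PySem.List.pyRange 0 H 1
       else (PySem.List.pyRange 0 H 1).reverse).foldl (fun acc2 i => acc2 ++ [i * W + j]) acc
        = acc ++ pvColB H W j := by
    intro j acc
    rw [PySem.List.foldl_append_singleton_eq_map]
    rfl
  have outer : ∀ (l : List Int) (acc : List Int),
      l.foldl (fun acc j =>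
        (if PySem.Int.mod j 2 = 0 then PySem.List.pyRange 0 H 1
         else (PySem.List.pyRange 0 H 1).reverse).foldl (fun acc2 i => acc2 ++ [i * W + j]) acc)
        acc = acc ++ l.flatMap (pvColB H W) := by
    intro l
    induction l with
    | nil => intro acc; simp
    | cons x l ih =>
      intro acc
      rw [List.foldl_cons, inner, ih, List.flatMap_cons, List.append_assoc]
  simpa using outer (PySem.List.pyRange 0 W 1) []

-- ===== VERDICT (by name: the statement is the Claim_ definition above) =====
theorem Parallel_snake_vertical_raises : Claim_raises_Parallel_snake_vertical := by
  unfold Claim_raises_Parallel_snake_vertical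
  refine ⟨?_, by decide⟩
  rintro ⟨H, W⟩ _ ⟨h1, h2⟩ (h3 | h3) <;> omega

theorem Parallel_snake_vertical_spec : Claim_equal_Parallel_snake_vertical := by
  intro hw hdom hpre
  obtain ⟨H, W⟩ := hw
  unfold Spec_Parallel_snake_vertical Parallel_snake_vertical Parallel_snake_vertical_alt
  simp only
  by_cases hW : 0 < W
  · have hH : 0 < H := by
      by_contra hc
      exact Parallel_snake_vertical_raises.1 (H, W) hdom ⟨hW, by omega⟩ hpre
    have hHc : H = (H.toNat : Int) := (Int.toNat_of_nonneg (le_of_lt hH)).symm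
    have hWc : W = (W.toNat : Int) := (Int.toNat_of_nonneg (le_of_lt hW)).symm
    have hfuel : (H * W).toNat = W.toNat * H.toNat := by
      have h1 : ((H * W).toNat : Int) = H * W := Int.toNat_of_nonneg (by positivity)
      have h2 : ((W.toNat * H.toNat : Nat) : Int) = H * W := by
        push_cast; rw [← hHc, ← hWc]; ring
      exact_mod_cast h1.trans h2.symm
    have hsim := pvLoopA_sim H W ((H * W).toNat) 0 0 true []
      (List.replicate (H * W).toNat (-1)) []
    have hmain := pvStream_main H W H.toNat hHc (by omega) W.toNat 0 true
      (le_refl 0) (by omega) (by simp)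
    rw [if_pos rfl] at hmain
    rw [hfuel] at hsim
    rw [hmain] at hsim
    rw [hfuel, hsim.1, hsim.2, if_pos hH, pvB_o1, pvApply_enum]
    simp
  · have hnil : PySem.List.pyRange 0 W 1 = [] := PySem.List.pyRange_one_eq_nil (by omega)
    have hA : ∀ inv, pvLoopA H W ((H * W).toNat) 0 0 true [] inv [] = ([], inv, []) := by
      intro inv
      cases hfe : (H * W).toNat with
      | zero => simp [pvLoopA]
      | succ k => simp [pvLoopA, hW]
    rw [hA, hnil]
    simp [PySem.List.enumerate_nil]
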